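-- pv_equiv track=rewrite | github.com/981377660LMT/algorithm-study | 19_数学/因数筛/每个数的约数有多少个.py | countFactor
-- ===== SOURCE A (Python) =====
-- from typing import List
--
-- def countFactor(nums: List[int]) -> List[int]:
--     """对于每个数，原数组中有多少个他的约数."""
--     upper = max(nums) + 1
--     c1, c2 = [0] * upper, [0] * upper
--     for v in nums:
--         c1[v] += 1
--     for f in range(1, upper):
--         for m in range(f, upper, f):
--             c2[m] += c1[f]
--     return c2
-- ===== SOURCE B (Python) =====
-- def countFactor(nums):
--     """对于每个数，原数组中有多少个他的约数."""
--     upper = max(nums) + 1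
--     cnt = {}
--     for v in nums:
--         cnt[v] = cnt.get(v, 0) + 1
--     res = [0] * upper
--     for m in range(1, upper):
--         s = 0
--         f = 1
--         while f * f <= m:
--             if m % f == 0:
--                 s += cnt.get(f, 0)
--                 g = m // f
--                 if g != f:
--                     s += cnt.get(g, 0)
--             f += 1
--         res[m] = s
--     return res
-- ===== Notes on version B (the rewrite author's own statement) =====
-- stated objective: alternative
-- what changed: Instead of A's sieve that pushes each candidate factor's count onto all its multiples (nested strided ranges over an index array), B pulls: for each m it enumerates m's divisors by trial division up to sqrt(m) and sums their multiplicities from a dict counter.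
-- outside the precondition, e.g. on countFactor([-1, 2]): A returns [0, 0, 2], B returns [0, 0, 1]
import Mathlib
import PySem

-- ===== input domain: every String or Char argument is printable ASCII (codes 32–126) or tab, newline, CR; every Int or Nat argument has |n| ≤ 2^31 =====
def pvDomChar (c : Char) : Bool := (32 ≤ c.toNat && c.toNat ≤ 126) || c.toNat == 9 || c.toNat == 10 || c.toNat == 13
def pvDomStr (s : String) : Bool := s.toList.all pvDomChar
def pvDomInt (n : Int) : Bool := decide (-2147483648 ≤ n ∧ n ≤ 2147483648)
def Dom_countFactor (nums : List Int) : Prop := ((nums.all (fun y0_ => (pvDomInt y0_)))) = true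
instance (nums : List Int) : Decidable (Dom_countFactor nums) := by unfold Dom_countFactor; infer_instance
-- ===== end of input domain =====

-- B replaces A's push-sieve (each factor strides over its multiples) by a pull: for each m it
-- enumerates m's divisors by trial division up to sqrt(m) and sums their multiplicities from a
-- dict counter; a genuinely different traversal of the same data, not claimed faster.

-- ===== PORT A =====
-- literal transliteration of A: upper = max(nums)+1; count array c1; then
-- for f in range(1, upper): for m in range(f, upper, f): c2[m] += c1[f]
def countFactor (nums : List Int) : List Int :=
  match PySem.List.max? nums (fun v => v) with
  | none => []                            -- max([]) raises ValueError (outside Pre_)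
  | some mx =>
    let upper : Int := mx + 1
    let c1 : List Int := List.replicate upper.toNat 0
    let c2 : List Int := List.replicate upper.toNat 0
    let c1 := nums.foldl
      (fun c1 v => PySem.List.pySetD c1 v (PySem.List.pyGetD c1 v 0 + 1)) c1
    (PySem.List.pyRange 1 upper 1).foldl
      (fun c2 f =>
        (PySem.List.pyRange f upper f).foldl
          (fun c2 m =>
            PySem.List.pySetD c2 m (PySem.List.pyGetD c2 m 0 + PySem.List.pyGetD c1 f 0)) c2)
      c2

-- ===== PORT B =====
-- the 'while f * f <= m: …; f += 1' loop of Source B, accumulating s left-to-right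
def pullWhile (cnt : PySem.Dict Int Int) (m : Int) (f : Int) : Int :=
  if h : 1 ≤ f ∧ f * f ≤ m then
    (if PySem.Int.mod m f = 0 then
       cnt.getD f 0 +
         (if PySem.Int.floordiv m f ≠ f then cnt.getD (PySem.Int.floordiv m f) 0 else 0)
     else 0) + pullWhile cnt m (f + 1)
  else 0
termination_by (m + 1 - f).toNat
decreasing_by
  have hf : f ≤ m := by nlinarith [h.1, h.2]
  omega

-- transliteration of Source B: dict counter, then pull divisor multiplicities for each m ≥ 1
def countFactor_alt (nums : List Int) : List Int :=
  match PySem.List.max? nums (fun v => v) with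
  | none => []                            -- max([]) raises ValueError (outside Pre_)
  | some mx =>
    let upper : Int := mx + 1
    let cnt : PySem.Dict Int Int :=
      nums.foldl (fun d v => d.insert v (d.getD v 0 + 1)) PySem.Dict.empty
    let res : List Int := List.replicate upper.toNat 0
    (PySem.List.pyRange 1 upper 1).foldl
      (fun res m => PySem.List.pySetD res m (pullWhile cnt m 1)) res

-- ===== PRECONDITION & SPEC =====
-- Pre_ excludes the inputs on which A raises (empty list; any element below -(max+1), in
-- particular every all-negative list) and the lists containing a negative element, on which A's
-- counts are an accident of Python negative-index wraparound (a negative v is tallied as the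
-- value upper+v); B naturally treats a negative value as dividing nothing.
def Pre_countFactor (nums : List Int) : Prop := nums ≠ [] ∧ ∀ v ∈ nums, 0 ≤ v
instance (nums : List Int) : Decidable (Pre_countFactor nums) := by
  unfold Pre_countFactor; infer_instance

def pvWitness_countFactor : List Int := [1, 2, 2]

def Spec_countFactor (nums : List Int) (out : List Int) : Prop := out = countFactor_alt nums
instance (nums : List Int) (out : List Int) : Decidable (Spec_countFactor nums out) := by
  unfold Spec_countFactor; infer_instance

-- ===== CLAIM (what is proved, stated in full; the proofs are below) =====
def Claim_equal_countFactor : Prop :=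
  ∀ (nums : List Int), Dom_countFactor nums → Pre_countFactor nums →
    Spec_countFactor nums (countFactor nums)

-- ===== LEMMAS AND PROOFS =====

-- getD after a single in-range set
lemma getD_set_eq (c : List Int) (i j : Nat) (a : Int) (hi : i < c.length) :
    (c.set i a).getD j 0 = if i = j then a else c.getD j 0 := by
  rw [List.getD_eq_getElem?_getD, List.getElem?_set]
  split
  · simp
  · rw [List.getD_eq_getElem?_getD]

-- length is preserved by any fold of pySetD updates
lemma length_fold_setD (g : List Int → Int → Int) (L : List Int) (c : List Int) :
    (L.foldl (fun c m => PySem.List.pySetD c m (g c m)) c).length = c.length := by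
  induction L generalizing c with
  | nil => rfl
  | cons m L ih => simp [List.foldl_cons, ih, PySem.List.length_pySetD]

-- A's counting loop: index j picks up the number of occurrences of the value j
lemma fold_inc_getD (l : List Int) : ∀ (c : List Int),
    (∀ v ∈ l, 0 ≤ v ∧ v < (c.length : Int)) → ∀ (j : Nat), j < c.length →
    (l.foldl (fun c v => PySem.List.pySetD c v (PySem.List.pyGetD c v 0 + 1)) c).getD j 0
      = c.getD j 0 + (l.count (j : Int) : Int) := by
  induction l with
  | nil => intro c h j hj; simp
  | cons v l ih =>
    intro c h j hj
    obtain ⟨hv0, hvl⟩ := h v (by simp)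
    have hset : PySem.List.pySetD c v (PySem.List.pyGetD c v 0 + 1)
        = c.set v.toNat (c.getD v.toNat 0 + 1) := by
      rw [PySem.List.pySetD_of_nonneg c _ hv0,
        PySem.List.pyGetD_eq_getElem c 0 hv0 (by omega),
        List.getD_eq_getElem c 0 (by omega)]
    rw [List.foldl_cons, hset,
      ih _ (by intro w hw; simpa [List.length_set] using h w (List.mem_cons_of_mem _ hw)) j
        (by simpa [List.length_set] using hj),
      getD_set_eq c _ j _ (by omega), List.count_cons]
    by_cases hjv : v.toNat = j
    · have hb : (v == (j : Int)) = true := by simp; omega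
      rw [if_pos hjv, hb, if_pos rfl, hjv]
      push_cast; ring
    · have hb : ¬ ((v == (j : Int)) = true) := by simp; omega
      rw [if_neg hjv, if_neg hb]
      push_cast; ring

-- adding a constant at a Nodup set of in-range indices, pointwise view
lemma fold_addAt (L : List Int) : ∀ (c : List Int) (a : Int), L.Nodup →
    (∀ m ∈ L, 0 ≤ m ∧ m < (c.length : Int)) → ∀ (j : Nat), j < c.length →
    (L.foldl (fun c m => PySem.List.pySetD c m (PySem.List.pyGetD c m 0 + a)) c).getD j 0
      = c.getD j 0 + (if (j : Int) ∈ L then a else 0) := by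
  induction L with
  | nil => intro c a _ _ j hj; simp
  | cons m L ih =>
    intro c a hnd h j hj
    obtain ⟨hm0, hml⟩ := h m (by simp)
    have hset : PySem.List.pySetD c m (PySem.List.pyGetD c m 0 + a)
        = c.set m.toNat (c.getD m.toNat 0 + a) := by
      rw [PySem.List.pySetD_of_nonneg c _ hm0,
        PySem.List.pyGetD_eq_getElem c 0 hm0 (by omega),
        List.getD_eq_getElem c 0 (by omega)]
    rw [List.foldl_cons, hset,
      ih _ a hnd.of_cons
        (by intro w hw; simpa [List.length_set] using h w (List.mem_cons_of_mem _ hw)) j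
        (by simpa [List.length_set] using hj),
      getD_set_eq c _ j _ (by omega)]
    by_cases hjm : m.toNat = j
    · have hmj : m = (j : Int) := by omega
      have hnotin : (j : Int) ∉ L := by rw [← hmj]; exact (List.nodup_cons.mp hnd).1
      rw [if_pos hjm, if_neg hnotin, if_pos (by simp [← hmj]), hjm]
      ring
    · have hmj : m ≠ (j : Int) := by omega
      rw [if_neg hjm]
      by_cases hin : (j : Int) ∈ L
      · rw [if_pos hin, if_pos (by simp [hin])]
      · rw [if_neg hin, if_neg (by simp [hin, Ne.symm hmj]), add_zero]

-- writing values g m at a Nodup set of in-range indices, pointwise view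
lemma fold_setvals (L : List Int) : ∀ (c : List Int) (g : Int → Int), L.Nodup →
    (∀ m ∈ L, 0 ≤ m ∧ m < (c.length : Int)) → ∀ (j : Nat), j < c.length →
    (L.foldl (fun c m => PySem.List.pySetD c m (g m)) c).getD j 0
      = if (j : Int) ∈ L then g (j : Int) else c.getD j 0 := by
  induction L with
  | nil => intro c g _ _ j hj; simp
  | cons m L ih =>
    intro c g hnd h j hj
    obtain ⟨hm0, hml⟩ := h m (by simp)
    have hset : PySem.List.pySetD c m (g m) = c.set m.toNat (g m) :=
      PySem.List.pySetD_of_nonneg c _ hm0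
    rw [List.foldl_cons, hset,
      ih _ g hnd.of_cons
        (by intro w hw; simpa [List.length_set] using h w (List.mem_cons_of_mem _ hw)) j
        (by simpa [List.length_set] using hj)]
    by_cases hin : (j : Int) ∈ L
    · rw [if_pos hin, if_pos (by simp [hin])]
    · rw [if_neg hin]
      by_cases hjm : m.toNat = j
      · have hmj : m = (j : Int) := by omega
        rw [if_pos (by simp [← hmj]), getD_set_eq c m.toNat j (g m) (by omega), if_pos hjm, hmj]
      · have hmj : m ≠ (j : Int) := by omega
        rw [if_neg (by simp [hin, Ne.symm hmj]), getD_set_eq _ _ _ _ (by omega), if_neg hjm]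

lemma nodup_pyRange_pos (a b s : Int) (hs : 0 < s) : (PySem.List.pyRange a b s).Nodup := by
  rw [PySem.List.pyRange_of_pos a b hs]
  refine (List.nodup_range).map ?_
  intro x y hxy
  have h2 : s * (x : Int) = s * (y : Int) := by linarith
  have := mul_left_cancel₀ (by omega : (s : Int) ≠ 0) h2
  exact_mod_cast this

-- A's outer loop, pointwise: each factor f adds val f to every index in its stride list
lemma fold_outer (F : List Int) : ∀ (c : List Int) (val : Int → Int) (U : Int),
    U = (c.length : Int) → (∀ f ∈ F, 1 ≤ f) → ∀ (j : Nat), j < c.length →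
    (F.foldl
      (fun c2 f =>
        (PySem.List.pyRange f U f).foldl
          (fun c2 m => PySem.List.pySetD c2 m (PySem.List.pyGetD c2 m 0 + val f)) c2)
      c).getD j 0
      = c.getD j 0
        + (F.map (fun f => if (j : Int) ∈ PySem.List.pyRange f U f then val f else 0)).sum := by
  induction F with
  | nil => intro c val U hU hF j hj; simp
  | cons f F ih =>
    intro c val U hU hF j hj
    have hf1 : 1 ≤ f := hF f (by simp)
    have hlen : ((PySem.List.pyRange f U f).foldl
        (fun c2 m => PySem.List.pySetD c2 m (PySem.List.pyGetD c2 m 0 + val f)) c).length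
        = c.length := length_fold_setD (fun c2 m => PySem.List.pyGetD c2 m 0 + val f) _ c
    rw [List.foldl_cons,
      ih _ val U (by rw [hlen]; exact hU) (fun w hw => hF w (List.mem_cons_of_mem _ hw)) j
        (by rw [hlen]; exact hj),
      fold_addAt _ c (val f) (nodup_pyRange_pos f U f (by omega))
        (by intro m hm
            have := (PySem.List.mem_pyRange_iff_of_pos (by omega : (0:Int) < f) m).mp hm
            omega) j hj]
    simp only [List.map_cons, List.sum_cons]
    ring

-- the stride-membership indicator sum over all candidate factors = sum over the divisor Finset
lemma listsum_to_divisors (U : Nat) (j : Nat) (hj1 : 1 ≤ j) (hjU : j < U) (g : Int → Int) :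
    ((PySem.List.pyRange 1 (U : Int) 1).map
        (fun f => if (j : Int) ∈ PySem.List.pyRange f (U : Int) f then g f else 0)).sum
      = ∑ d ∈ j.divisors, g (d : Int) := by
  have step1 : ((PySem.List.pyRange 1 (U : Int) 1).map
        (fun f => if (j : Int) ∈ PySem.List.pyRange f (U : Int) f then g f else 0))
      = ((PySem.List.pyRange 1 (U : Int) 1).map
        (fun f => if f ∣ (j : Int) then g f else 0)) := by
    apply List.map_congr_left
    intro f hf
    have hf' := (PySem.List.mem_pyRange_one).mp hf
    have hmem := @PySem.List.mem_pyRange_iff_of_pos f (U : Int) f (by omega : (0:Int) < f) (j : Int)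
    by_cases hd : f ∣ (j : Int)
    · rw [if_pos hd, if_pos]
      rw [hmem]
      refine ⟨Int.le_of_dvd (by omega) hd, by omega, ?_⟩
      exact dvd_sub hd (dvd_refl f)
    · rw [if_neg hd, if_neg]
      rw [hmem]
      rintro ⟨h1, h2, h3⟩
      exact hd (by have := dvd_add h3 (dvd_refl f); simpa using this)
  rw [step1, PySem.List.pyRange_one, List.map_map]
  have step2 : (List.map ((fun f => if f ∣ (j : Int) then g f else 0) ∘ fun k : Nat => (1 : Int) + ↑k)
      (List.range ((U : Int) - 1).toNat)).sum
      = ∑ k ∈ Finset.range ((U : Int) - 1).toNat,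
          (if ((1 : Int) + k) ∣ (j : Int) then g (1 + k) else 0) := rfl
  rw [step2]
  have hU1 : ((U : Int) - 1).toNat = U - 1 := by omega
  rw [hU1]
  have step3 : ∑ k ∈ Finset.range (U - 1),
        (if ((1 : Int) + k) ∣ (j : Int) then g (1 + k) else 0)
      = ∑ d ∈ Finset.Ico 1 U, (if (d : Int) ∣ (j : Int) then g d else 0) := by
    rw [Finset.sum_Ico_eq_sum_range]
    apply Finset.sum_congr rfl
    intro k _
    push_cast
    ring_nf
  rw [step3]
  rw [show (∑ d ∈ Finset.Ico 1 U, (if (d : Int) ∣ (j : Int) then g d else 0))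
      = ∑ d ∈ (Finset.Ico 1 U).filter (fun d : Nat => (d : Int) ∣ (j : Int)), g d from
    (Finset.sum_filter (fun d : Nat => (d : Int) ∣ (j : Int)) (fun d : Nat => g d)).symm]
  have step4 : (Finset.Ico 1 U).filter (fun d : Nat => (d : Int) ∣ (j : Int)) = j.divisors := by
    ext d
    simp only [Finset.mem_filter, Finset.mem_Ico, Nat.mem_divisors, Int.natCast_dvd_natCast]
    constructor
    · rintro ⟨⟨h1, h2⟩, h3⟩; exact ⟨h3, by omega⟩
    · rintro ⟨h1, h2⟩
      have hd1 : 1 ≤ d := Nat.pos_of_dvd_of_pos h1 (by omega)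
      have : d ≤ j := Nat.le_of_dvd (by omega) h1
      exact ⟨⟨hd1, by omega⟩, h1⟩
  rw [step4]

lemma min_div_dvd (m d : Nat) (hd : d ∣ m) : min d (m / d) ∣ m := by
  rcases min_cases d (m / d) with ⟨h, _⟩ | ⟨h, _⟩
  · rw [h]; exact hd
  · rw [h]; exact Nat.div_dvd_of_dvd hd

lemma min_eq_iff_aux (m d f : Nat) (hm : 1 ≤ m) (hd : d ∣ m) (hf : f ∣ m)
    (hff : f * f ≤ m) (hf1 : 1 ≤ f) : min d (m / d) = f ↔ d = f ∨ d = m / f := by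
  have hd1 : 1 ≤ d := Nat.pos_of_dvd_of_pos hd (by omega)
  have hfle : f ≤ m / f := (Nat.le_div_iff_mul_le (by omega)).mpr hff
  constructor
  · intro h
    rcases min_cases d (m / d) with ⟨h1, h2⟩ | ⟨h1, h2⟩
    · left; omega
    · right
      have hmd : m / d = f := by omega
      have : m = d * f := by rw [← hmd]; exact (Nat.mul_div_cancel' hd).symm
      rw [this, Nat.mul_div_cancel _ (by omega)]
  · rintro (rfl | rfl)
    · exact min_eq_left hfle
    · rw [Nat.div_div_self hf (by omega)]
      exact min_eq_right hfle

-- the while loop computes the divisor-multiplicity sum from level f on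
lemma pullWhile_inv (cnt : PySem.Dict Int Int) (m : Nat) (hm : 1 ≤ m) :
    ∀ (k f : Nat), m + 1 - f ≤ k → 1 ≤ f →
      pullWhile cnt (m : Int) (f : Int)
        = ∑ d ∈ m.divisors.filter (fun d => f ≤ min d (m / d)), cnt.getD (d : Int) 0 := by
  intro k
  induction k with
  | zero =>
    intro f hk hf1
    rw [pullWhile, dif_neg (by
      intro h
      have h3 : (f : Int) ≤ (f : Int) * (f : Int) := le_mul_of_one_le_left (by linarith [h.1]) h.1
      have h4 : (f : Int) ≤ (m : Int) := le_trans h3 h.2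
      have h5 : f ≤ m := by exact_mod_cast h4
      omega)]
    rw [Finset.filter_false_of_mem, Finset.sum_empty]
    intro d hd
    have h1 := Nat.pos_of_mem_divisors hd
    have h2 : d ≤ m := Nat.le_of_dvd (by omega) (Nat.mem_divisors.mp hd).1
    simp only [not_le]
    calc min d (m / d) ≤ d := min_le_left _ _
    _ < f := by omega
  | succ k ih =>
    intro f hk hf1
    by_cases hcond : f * f ≤ m
    · rw [pullWhile, dif_pos ⟨by exact_mod_cast hf1, by exact_mod_cast hcond⟩]
      have ihh := ih (f + 1) (by omega) (by omega)
      push_cast at ihh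
      rw [ihh]
      by_cases hfd : f ∣ m
      · rw [if_pos (by rw [PySem.Int.mod_eq_zero_iff_dvd]; exact_mod_cast hfd)]
        have hfloor : PySem.Int.floordiv (m : Int) (f : Int) = ((m / f : Nat) : Int) :=
          PySem.Int.floordiv_natCast m f
        have hfle : f ≤ m / f := (Nat.le_div_iff_mul_le (by omega)).mpr hcond
        have hmf_dvd : m / f ∣ m := Nat.div_dvd_of_dvd hfd
        have hmem_f : f ∈ m.divisors := Nat.mem_divisors.mpr ⟨hfd, by omega⟩
        have hmem_mf : m / f ∈ m.divisors := Nat.mem_divisors.mpr ⟨hmf_dvd, by omega⟩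
        have hmin_f : min f (m / f) = f := min_eq_left hfle
        have hmin_mf : min (m / f) (m / (m / f)) = f := by
          rw [Nat.div_div_self hfd (by omega)]; exact min_eq_right hfle
        by_cases heq : m / f = f
        · rw [hfloor, if_neg (by exact_mod_cast (by omega : ¬ (m / f ≠ f)))]
          have hsplit : m.divisors.filter (fun d => f ≤ min d (m / d))
              = insert f (m.divisors.filter (fun d => f + 1 ≤ min d (m / d))) := by
            ext d
            simp only [Finset.mem_filter, Finset.mem_insert]
            constructor
            · rintro ⟨hd, hle⟩
              by_cases hmin : min d (m / d) = f
              · have := (min_eq_iff_aux m d f hm (Nat.mem_divisors.mp hd).1 hfd hcond hf1).mp hmin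
                left; omega
              · right; exact ⟨hd, by omega⟩
            · rintro (rfl | ⟨hd, hle⟩)
              · exact ⟨hmem_f, by omega⟩
              · exact ⟨hd, by omega⟩
          rw [hsplit, Finset.sum_insert (by simp only [Finset.mem_filter]; push Not; intro _; omega)]
          ring
        · rw [hfloor, if_pos (by exact_mod_cast (by omega : ¬ (m / f = f)))]
          have hsplit : m.divisors.filter (fun d => f ≤ min d (m / d))
              = insert f (insert (m / f) (m.divisors.filter (fun d => f + 1 ≤ min d (m / d)))) := by
            ext d
            simp only [Finset.mem_filter, Finset.mem_insert]
            constructor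
            · rintro ⟨hd, hle⟩
              by_cases hmin : min d (m / d) = f
              · have := (min_eq_iff_aux m d f hm (Nat.mem_divisors.mp hd).1 hfd hcond hf1).mp hmin
                tauto
              · right; right; exact ⟨hd, by omega⟩
            · rintro (rfl | rfl | ⟨hd, hle⟩)
              · exact ⟨hmem_f, by omega⟩
              · exact ⟨hmem_mf, by omega⟩
              · exact ⟨hd, by omega⟩
          rw [hsplit,
            Finset.sum_insert (by
              simp only [Finset.mem_insert, Finset.mem_filter]
              push Not
              exact ⟨fun h => heq h.symm, fun _ => by omega⟩),
            Finset.sum_insert (by simp only [Finset.mem_filter]; push Not; intro _; omega)]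
          ring
      · rw [if_neg (by rw [PySem.Int.mod_eq_zero_iff_dvd]; exact_mod_cast hfd), zero_add]
        congr 1
        apply Finset.filter_congr
        intro d hd
        have hdd := (Nat.mem_divisors.mp hd).1
        constructor
        · omega
        · intro hle
          by_cases hmin : min d (m / d) = f
          · exact absurd (hmin ▸ min_div_dvd m d hdd) hfd
          · omega
    · rw [pullWhile, dif_neg (by intro h; exact hcond (by exact_mod_cast h.2))]
      rw [Finset.filter_false_of_mem, Finset.sum_empty]
      intro d hd
      have hdd := (Nat.mem_divisors.mp hd).1
      simp only [not_le]
      by_contra hge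
      push Not at hge
      have h1 : f * f ≤ min d (m / d) * min d (m / d) := Nat.mul_le_mul hge hge
      have h2 : min d (m / d) * min d (m / d) ≤ d * (m / d) :=
        Nat.mul_le_mul (min_le_left _ _) (min_le_right _ _)
      rw [Nat.mul_div_cancel' hdd] at h2
      omega

lemma pullWhile_divisors (cnt : PySem.Dict Int Int) (m : Nat) (hm : 1 ≤ m) :
    pullWhile cnt (m : Int) 1 = ∑ d ∈ m.divisors, cnt.getD (d : Int) 0 := by
  have h := pullWhile_inv cnt m hm (m + 1) 1 (by omega) (by omega)
  norm_num at h
  rw [h]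
  congr 1
  apply Finset.filter_true_of_mem
  intro d hd
  have h1 := Nat.pos_of_mem_divisors hd
  have h2 : d ∣ m := (Nat.mem_divisors.mp hd).1
  have : 1 ≤ m / d := (Nat.one_le_div_iff h1).mpr (Nat.le_of_dvd (by omega) h2)
  omega

lemma length_fold_outer (F : List Int) : ∀ (c : List Int) (val : Int → Int) (U : Int),
    (F.foldl
      (fun c2 f =>
        (PySem.List.pyRange f U f).foldl
          (fun c2 m => PySem.List.pySetD c2 m (PySem.List.pyGetD c2 m 0 + val f)) c2)
      c).length = c.length := by
  induction F with
  | nil => intro c val U; rfl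
  | cons f F ih =>
    intro c val U
    rw [List.foldl_cons, ih, length_fold_setD (fun c2 m => PySem.List.pyGetD c2 m 0 + val f)]

-- ===== VERDICT (by name: the statement is the Claim_ definition above) =====
theorem countFactor_spec : Claim_equal_countFactor := by
  intro nums _ hpre
  obtain ⟨hne, hpos⟩ := hpre
  unfold Spec_countFactor
  cases hmx : PySem.List.max? nums (fun v => v) with
  | none => exact absurd ((PySem.List.max?_eq_none_iff _ _).mp hmx) hne
  | some mx =>
    have hmemx := PySem.List.max?_mem hmx
    have hmax : ∀ y ∈ nums, y ≤ mx := PySem.List.max?_isMax hmx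
    have hmx0 : 0 ≤ mx := hpos mx hmemx
    have hUI : (((mx + 1).toNat : Int)) = mx + 1 := by omega
    set U : Nat := (mx + 1).toNat with hUdef
    -- the two folded constants
    set c1f : List Int := nums.foldl
      (fun c1 v => PySem.List.pySetD c1 v (PySem.List.pyGetD c1 v 0 + 1))
      (List.replicate U 0) with hc1f
    set cnt : PySem.Dict Int Int :=
      nums.foldl (fun d v => d.insert v (d.getD v 0 + 1)) PySem.Dict.empty with hcnt
    have hA : countFactor nums = (PySem.List.pyRange 1 (mx + 1) 1).foldl
        (fun c2 f =>
          (PySem.List.pyRange f (mx + 1) f).foldl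
            (fun c2 m =>
              PySem.List.pySetD c2 m (PySem.List.pyGetD c2 m 0 + PySem.List.pyGetD c1f f 0)) c2)
        (List.replicate U 0) := by
      simp only [countFactor, hmx, hc1f, hUdef]
    have hB : countFactor_alt nums = (PySem.List.pyRange 1 (mx + 1) 1).foldl
        (fun res m => PySem.List.pySetD res m (pullWhile cnt m 1))
        (List.replicate U 0) := by
      simp only [countFactor_alt, hmx, hcnt, hUdef]
    -- lengths
    have hlen1 : c1f.length = U := by
      rw [hc1f, length_fold_setD (fun c v => PySem.List.pyGetD c v 0 + 1), List.length_replicate]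
    have hlenA : (countFactor nums).length = U := by
      rw [hA, length_fold_outer, List.length_replicate]
    have hlenB : (countFactor_alt nums).length = U := by
      rw [hB, length_fold_setD (fun _ m => pullWhile cnt m 1), List.length_replicate]
    -- replicate reads as 0
    have hrep : ∀ j : Nat, (List.replicate U (0 : Int)).getD j 0 = 0 := by
      intro j
      rw [List.getD_eq_getElem?_getD, List.getElem?_replicate]
      split <;> rfl
    -- the count array reads the multiplicity
    have hcount : ∀ f : Int, 1 ≤ f → f < mx + 1 →
        PySem.List.pyGetD c1f f 0 = (nums.count f : Int) := by
      intro f h1 h2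
      rw [PySem.List.pyGetD_eq_getElem c1f 0 (by omega) (by rw [hlen1]; omega),
        ← List.getD_eq_getElem c1f 0 (by rw [hlen1]; omega), hc1f,
        fold_inc_getD nums (List.replicate U 0)
          (by intro v hv
              have := hpos v hv
              have := hmax v hv
              simp only [List.length_replicate]
              omega)
          f.toNat (by simp only [List.length_replicate]; omega),
        hrep]
      have : ((f.toNat : Nat) : Int) = f := by omega
      rw [this, zero_add]
    -- the dict counter reads the multiplicity
    have hcnt_count : ∀ v : Int, cnt.getD v 0 = (nums.count v : Int) := by
      intro v
      rw [hcnt, PySem.Dict.getD_foldl_insert_add_one, PySem.Dict.getD_empty, zero_add]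
    -- pointwise equality
    apply List.ext_getElem (by rw [hlenA, hlenB])
    intro j hjA hjB
    have hjU : j < U := by rw [← hlenA]; exact hjA
    rw [← List.getD_eq_getElem _ 0 hjA, ← List.getD_eq_getElem _ 0 hjB]
    -- evaluate the A side
    have hAj : (countFactor nums).getD j 0
        = ((PySem.List.pyRange 1 (mx + 1) 1).map
            (fun f => if (j : Int) ∈ PySem.List.pyRange f (mx + 1) f
              then PySem.List.pyGetD c1f f 0 else 0)).sum := by
      rw [hA, fold_outer (PySem.List.pyRange 1 (mx + 1) 1) (List.replicate U 0)
          (fun f => PySem.List.pyGetD c1f f 0) (mx + 1)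
          (by simp only [List.length_replicate]; omega)
          (fun f hf => ((PySem.List.mem_pyRange_one).mp hf).1)
          j (by simp only [List.length_replicate]; exact hjU),
        hrep, zero_add]
    -- evaluate the B side
    have hBj : (countFactor_alt nums).getD j 0
        = if (j : Int) ∈ PySem.List.pyRange 1 (mx + 1) 1 then pullWhile cnt (j : Int) 1 else 0 := by
      rw [hB, fold_setvals (PySem.List.pyRange 1 (mx + 1) 1) (List.replicate U 0)
          (fun m => pullWhile cnt m 1) (nodup_pyRange_pos 1 (mx + 1) 1 (by omega))
          (by intro m hm
              have := (PySem.List.mem_pyRange_one).mp hm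
              simp only [List.length_replicate]
              omega)
          j (by simp only [List.length_replicate]; exact hjU)]
      split <;> simp [List.getD_eq_getElem?_getD, hjU]
    rw [hAj, hBj]
    by_cases hj0 : 1 ≤ j
    · -- j ≥ 1: both sides are the divisor-multiplicity sum
      rw [if_pos ((PySem.List.mem_pyRange_one).mpr (by omega)),
        pullWhile_divisors cnt j hj0]
      have hcast : ((U : Nat) : Int) = mx + 1 := hUI
      rw [show (mx + 1 : Int) = (U : Int) from hcast.symm]
      rw [listsum_to_divisors U j hj0 hjU (fun f => PySem.List.pyGetD c1f f 0)]
      apply Finset.sum_congr rfl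
      intro d hd
      have hd1 := Nat.pos_of_mem_divisors hd
      have hdj : d ≤ j := Nat.le_of_dvd (by omega) (Nat.mem_divisors.mp hd).1
      rw [hcount (d : Int) (by omega) (by omega), hcnt_count]
    · -- j = 0: both sides are 0
      rw [if_neg (by
        intro hmem
        have := (PySem.List.mem_pyRange_one).mp hmem
        omega)]
      apply List.sum_eq_zero
      intro x hx
      obtain ⟨f, hf, rfl⟩ := List.mem_map.mp hx
      have hf1 := ((PySem.List.mem_pyRange_one).mp hf).1
      rw [if_neg (by
        intro hmem
        have := (PySem.List.mem_pyRange_iff_of_pos (by omega : (0:Int) < f) (j : Int)).mp hmem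
        omega)]
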